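-- pv_equiv track=rewrite | github.com/lookbua/playtorium-assignment | src/repositories/calculate_original.py | original_campaign
-- ===== SOURCE A (Python) =====
-- def original_campaign(campaign):
--     final_campaign = []
--     added_categories = set()
--     campaign_type_map = {
--         "fixed amount": "coupon",
--         "percentage discount": "coupon",
--         "percentage discount by item category": "on top",
--         "discount by points": "on top",
--         "special campaigns": "seasonal",
--     }
--
--     for item in campaign:
--         campaign_type = campaign_type_map.get(item["name"])
--         if campaign_type and campaign_type not in added_categories:
--             final_campaign.append(item)
--             added_categories.add(campaign_type)
--     category_order = {"coupon": 0, "on top": 1, "seasonal": 2}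
--     final_campaign.sort(key=lambda x: category_order[campaign_type_map[x["name"]]])
--     return final_campaign
-- ===== SOURCE B (Python) =====
-- def original_campaign(campaign):
--     campaign_type_map = {
--         "fixed amount": "coupon",
--         "percentage discount": "coupon",
--         "percentage discount by item category": "on top",
--         "discount by points": "on top",
--         "special campaigns": "seasonal",
--     }
--     bucket = {}
--     for item in campaign:
--         category = campaign_type_map.get(item["name"])
--         if category and category not in bucket:
--             bucket[category] = item
--     return [bucket[c] for c in ("coupon", "on top", "seasonal") if c in bucket]
-- ===== Notes on version B (the rewrite author's own statement) =====
-- stated objective: simpler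
-- what changed: B replaces A's filter-into-list + set-of-seen-categories + final sort with a first-wins category->item table built in one pass and an emission driven by the fixed category order list, so no sort call remains.
import Mathlib
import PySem

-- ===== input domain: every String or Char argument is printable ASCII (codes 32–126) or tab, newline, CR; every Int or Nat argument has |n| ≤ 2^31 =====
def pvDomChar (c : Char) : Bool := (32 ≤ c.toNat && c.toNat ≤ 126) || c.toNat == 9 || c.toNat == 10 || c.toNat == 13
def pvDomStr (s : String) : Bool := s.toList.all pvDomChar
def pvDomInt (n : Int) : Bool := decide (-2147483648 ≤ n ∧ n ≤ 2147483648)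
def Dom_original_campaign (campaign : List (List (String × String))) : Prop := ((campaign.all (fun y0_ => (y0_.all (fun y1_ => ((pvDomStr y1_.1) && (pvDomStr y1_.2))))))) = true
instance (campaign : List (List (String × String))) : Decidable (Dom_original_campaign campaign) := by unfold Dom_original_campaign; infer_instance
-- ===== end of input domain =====

-- B replaces A's filter-list + seen-set + final sort with a first-wins category→item table
-- emitted along the fixed category order list (no sort); equivalence of return values is proved below.

-- ===== PORT A =====
-- the module-level campaign_type_map literal
def pvCtMap : PySem.Dict String String :=
  PySem.Dict.mk [("fixed amount", "coupon"), ("percentage discount", "coupon"),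
    ("percentage discount by item category", "on top"), ("discount by points", "on top"),
    ("special campaigns", "seasonal")]

-- campaign_type_map.get(item["name"]) (item["name"] raising KeyError = none, excluded by Pre_)
def pvCatOf (item : List (String × String)) : Option String :=
  ((PySem.Dict.mk item).get? "name").bind (fun n => pvCtMap.get? n)

def pvCatOrder : PySem.Dict String Int :=
  PySem.Dict.mk [("coupon", 0), ("on top", 1), ("seasonal", 2)]

-- sort key category_order[campaign_type_map[x["name"]]]; total getD form, exact on the
-- elements of final_campaign (whose names always map, so no KeyError is reachable there)
def pvKey (x : List (String × String)) : Int :=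
  pvCatOrder.getD (pvCtMap.getD (((PySem.Dict.mk x).get? "name").getD "") "") 0

-- A's loop body: append first item of each unseen (truthy) category
def pvStepA (st : List (List (String × String)) × PySem.Set String)
    (item : List (String × String)) :
    List (List (String × String)) × PySem.Set String :=
  match pvCatOf item with
  | none => st
  | some t => if t = "" then st
      else if PySem.Set.contains st.2 t then st
      else (st.1 ++ [item], PySem.Set.add st.2 t)

def original_campaign (campaign : List (List (String × String))) : List (List (String × String)) :=
  let st := campaign.foldl pvStepA ([], PySem.Set.empty)
  PySem.List.sorted st.1 pvKey false

-- ===== PORT B =====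
def pvCats : List String := ["coupon", "on top", "seasonal"]

-- B's loop body: first-wins insertion into the category→item table
def pvStepB (b : PySem.Dict String (List (String × String)))
    (item : List (String × String)) : PySem.Dict String (List (String × String)) :=
  match pvCatOf item with
  | none => b
  | some t => if t = "" then b
      else if b.contains t then b
      else b.insert t item

def original_campaign_alt (campaign : List (List (String × String))) : List (List (String × String)) :=
  let b := campaign.foldl pvStepB PySem.Dict.empty
  -- bucket[c]: total getD form, exact since the filter guarantees c ∈ bucket
  (pvCats.filter (fun c => b.contains c)).map (fun c => b.getD c [])

-- ===== PRECONDITION & SPEC =====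
-- Pre_ excludes only inputs on which A raises KeyError (an item without a "name" key); B raises there too.
def Pre_original_campaign (campaign : List (List (String × String))) : Prop :=
  ∀ item ∈ campaign, "name" ∈ item.map Prod.fst

instance (campaign : List (List (String × String))) : Decidable (Pre_original_campaign campaign) := by
  unfold Pre_original_campaign; infer_instance

def pvWitness_original_campaign : (List (List (String × String))) :=
  [[("name", "special campaigns"), ("amount", "30")], [("name", "fixed amount"), ("amount", "50")]]

def Spec_original_campaign (campaign : List (List (String × String))) (out : List (List (String × String))) : Prop := out = original_campaign_alt campaign
instance (campaign : List (List (String × String))) (out : List (List (String × String))) : Decidable (Spec_original_campaign campaign out) := by unfold Spec_original_campaign; infer_instance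

-- ===== CLAIM (what is proved, stated in full; the proofs are below) =====
def Claim_equal_original_campaign : Prop := ∀ (campaign : List (List (String × String))), Dom_original_campaign campaign → Pre_original_campaign campaign → Spec_original_campaign campaign (original_campaign campaign)

-- ===== LEMMAS AND PROOFS =====

-- every category produced by the map literal is in pvCats
lemma ctMap_mem {n t : String} (h : pvCtMap.get? n = some t) : t ∈ pvCats := by
  simp only [pvCtMap, PySem.Dict.get?_mk_cons] at h
  split_ifs at h <;> simp_all [pvCats, PySem.Dict.get?]

-- the sort key of an item whose category is t is t's category_order entry
lemma catOf_key {item : List (String × String)} {t : String}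
    (h : pvCatOf item = some t) : pvKey item = pvCatOrder.getD t 0 := by
  unfold pvCatOf at h
  rcases hn : (PySem.Dict.mk item).get? "name" with _ | n
  · rw [hn] at h; simp at h
  · rw [hn] at h; simp only [Option.bind_some] at h
    unfold pvKey
    rw [hn]
    simp only [Option.getD_some]
    rw [PySem.Dict.getD_of_get?_eq_some _ _ h]

lemma catOf_mem_cats {v : List (String × String)} {t : String}
    (h : pvCatOf v = some t) : t ∈ pvCats := by
  unfold pvCatOf at h
  rcases hn : (PySem.Dict.mk v).get? "name" with _ | n <;> rw [hn] at h
  · simp at h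
  · simp only [Option.bind_some] at h
    exact ctMap_mem h

lemma fold_inv (l : List (List (String × String)))
    (d : PySem.Dict String (List (String × String)))
    (hnd : d.keys.Nodup)
    (hit : ∀ p ∈ d.items, pvCatOf p.2 = some p.1) :
    l.foldl pvStepA (d.values, d.keys) = ((l.foldl pvStepB d).values, (l.foldl pvStepB d).keys)
    ∧ (l.foldl pvStepB d).keys.Nodup
    ∧ (∀ p ∈ (l.foldl pvStepB d).items, pvCatOf p.2 = some p.1) := by
  induction l generalizing d with
  | nil => exact ⟨rfl, hnd, hit⟩
  | cons item rest ih =>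
    simp only [List.foldl_cons]
    rcases h : pvCatOf item with _ | t
    · simpa only [pvStepA, pvStepB, h] using ih d hnd hit
    · by_cases ht : t = ""
      · simpa only [pvStepA, pvStepB, h, ht, if_pos] using ih d hnd hit
      · by_cases hc : d.contains t
        · have hm : t ∈ d.keys := (PySem.Dict.contains_iff_mem_keys d t).mp hc
          have hsc : PySem.Set.contains d.keys t = true := by
            simp [PySem.Set.contains, hm]
          simpa only [pvStepA, pvStepB, h, ht, if_neg, hsc, hc, if_pos, if_true]
            using ih d hnd hit
        · have hcf : d.contains t = false := by simpa using hc
          have hm : t ∉ d.keys := fun hmem =>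
            hc ((PySem.Dict.contains_iff_mem_keys d t).mpr hmem)
          have hsc : PySem.Set.contains d.keys t = false := by
            simp [PySem.Set.contains]; exact hm
          have hitems : (d.insert t item).items = d.items ++ [(t, item)] :=
            PySem.Dict.items_insert_of_not_contains d item hcf
          have hkeys : (d.insert t item).keys = d.keys ++ [t] :=
            PySem.Dict.keys_insert_of_not_contains d item hcf
          have hvals : (d.insert t item).values = d.values ++ [item] := by
            simp [PySem.Dict.values, hitems]
          have hstA : pvStepA (d.values, d.keys) item = (d.values ++ [item], PySem.Set.add d.keys t) := by
            simp [pvStepA, h, ht, hm]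
          have hadd : PySem.Set.add d.keys t = d.keys ++ [t] := by
            simp [PySem.Set.add, hm]
          have hstB : pvStepB d item = d.insert t item := by
            simp [pvStepB, h, ht, hcf]
          rw [hstA, hadd, hstB, ← hvals, ← hkeys]
          apply ih
          · rw [hkeys]
            simp [List.nodup_append, hnd]
            intro a ha hat
            exact hm (hat ▸ ha)
          · intro p hp
            rw [hitems] at hp
            rcases List.mem_append.mp hp with hp | hp
            · exact hit p hp
            · simp only [List.mem_singleton] at hp
              subst hp
              exact h

lemma raw_values (ps : List (String × List (String × String)))
    (hnd : (ps.map (fun x => x.1)).Nodup) :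
    ps.map (fun x => x.2)
      = (ps.map (fun x => x.1)).map (fun k => (PySem.Dict.mk ps).getD k []) := by
  induction ps with
  | nil => rfl
  | cons p rest ih =>
    obtain ⟨k, v⟩ := p
    simp only [List.map_cons] at hnd ⊢
    have hk : (PySem.Dict.mk ((k, v) :: rest)).getD k [] = v := by
      simp [PySem.Dict.getD, PySem.Dict.get?_mk_cons]
    rw [hk]
    congr 1
    rw [ih hnd.of_cons]
    apply List.map_congr_left
    intro a ha
    have hak : (k == a) = false := by
      have : k ∉ rest.map (fun x => x.1) := (List.nodup_cons.mp hnd).1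
      have hne : k ≠ a := fun hh => this (hh ▸ ha)
      simpa using hne
    simp [PySem.Dict.getD, PySem.Dict.get?_mk_cons, hak]

lemma values_eq_keys_map (d : PySem.Dict String (List (String × String)))
    (hnd : d.keys.Nodup) :
    d.values = d.keys.map (fun k => d.getD k []) := by
  obtain ⟨ps⟩ := d
  exact raw_values ps hnd

lemma key_getD (d : PySem.Dict String (List (String × String)))
    (hit : ∀ p ∈ d.items, pvCatOf p.2 = some p.1)
    {c : String} (hc : c ∈ d.keys) :
    pvKey (d.getD c []) = pvCatOrder.getD c 0 := by
  have hc' : d.contains c = true := (PySem.Dict.contains_iff_mem_keys d c).mpr hc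
  rw [PySem.Dict.contains_eq_isSome_get?] at hc'
  rcases hg : d.get? c with _ | v
  · rw [hg] at hc'; simp at hc'
  · have hgd : d.getD c [] = v := PySem.Dict.getD_of_get?_eq_some _ _ hg
    have hmem : (c, v) ∈ d.items := PySem.Dict.mem_items_of_get?_eq_some _ hg
    have := hit (c, v) hmem
    rw [hgd]
    exact catOf_key this

lemma emit_perm (d : PySem.Dict String (List (String × String)))
    (hnd : d.keys.Nodup)
    (hit : ∀ p ∈ d.items, pvCatOf p.2 = some p.1) :
    ((pvCats.filter (fun c => d.contains c)).map (fun c => d.getD c [])).Perm d.values := by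
  have hsub : ∀ k ∈ d.keys, k ∈ pvCats := by
    intro k hk
    simp only [PySem.Dict.keys, List.mem_map] at hk
    obtain ⟨p, hp, hpk⟩ := hk
    exact hpk ▸ catOf_mem_cats (hit p hp)
  have hfil : (pvCats.filter (fun c => d.contains c)).Perm d.keys := by
    rw [List.perm_ext_iff_of_nodup (List.Nodup.filter _ (by decide)) hnd]
    intro a
    simp only [List.mem_filter]
    constructor
    · rintro ⟨-, ha⟩
      exact (PySem.Dict.contains_iff_mem_keys d a).mp ha
    · intro ha
      exact ⟨hsub a ha, (PySem.Dict.contains_iff_mem_keys d a).mpr ha⟩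
  rw [values_eq_keys_map d hnd]
  exact hfil.map _

lemma emit_pairwise (d : PySem.Dict String (List (String × String)))
    (hnd : d.keys.Nodup)
    (hit : ∀ p ∈ d.items, pvCatOf p.2 = some p.1) :
    ((pvCats.filter (fun c => d.contains c)).map (fun c => d.getD c [])).Pairwise
      (fun a b => pvKey a < pvKey b) := by
  have hkey : ∀ c, d.contains c = true → pvKey (d.getD c []) = pvCatOrder.getD c 0 :=
    fun c hc => key_getD d hit ((PySem.Dict.contains_iff_mem_keys d c).mp hc)
  rw [List.pairwise_map]
  have hbase : pvCats.Pairwise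
      (fun a b => d.contains a = true → d.contains b = true →
        pvKey (d.getD a []) < pvKey (d.getD b [])) := by
    simp only [pvCats, List.pairwise_cons, List.mem_cons, List.not_mem_nil, List.Pairwise.nil]
    refine ⟨?_, ?_, fun _ h => h.elim, trivial⟩
    · intro b hbm
      rcases hbm with rfl | rfl | hF
      · intro ha hb; rw [hkey _ ha, hkey _ hb]; decide
      · intro ha hb; rw [hkey _ ha, hkey _ hb]; decide
      · exact hF.elim
    · intro b hbm
      rcases hbm with rfl | hF
      · intro ha hb; rw [hkey _ ha, hkey _ hb]; decide
      · exact hF.elim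
  have hfil : (pvCats.filter (fun c => d.contains c)).Pairwise
      (fun a b => d.contains a = true → d.contains b = true →
        pvKey (d.getD a []) < pvKey (d.getD b [])) :=
    hbase.sublist List.filter_sublist
  refine hfil.imp_of_mem ?_
  intro a b ha hb hr
  exact hr (List.of_mem_filter ha) (List.of_mem_filter hb)

-- ===== VERDICT (by name: the statement is the Claim_ definition above) =====
theorem original_campaign_spec : Claim_equal_original_campaign := by
  intro campaign _ _
  unfold Spec_original_campaign original_campaign original_campaign_alt
  have h0 : ∀ p ∈ (PySem.Dict.empty : PySem.Dict String (List (String × String))).items,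
      pvCatOf p.2 = some p.1 := by intro p hp; simp [PySem.Dict.empty] at hp
  have hnd0 : (PySem.Dict.empty : PySem.Dict String (List (String × String))).keys.Nodup :=
    PySem.Dict.nodup_keys_empty
  obtain ⟨heq, hnd, hit⟩ := fold_inv campaign PySem.Dict.empty hnd0 h0
  have hinit : (([], PySem.Set.empty) : List (List (String × String)) × PySem.Set String)
      = ((PySem.Dict.empty : PySem.Dict String (List (String × String))).values,
         (PySem.Dict.empty : PySem.Dict String (List (String × String))).keys) := by
    simp [PySem.Dict.empty, PySem.Dict.values, PySem.Dict.keys, PySem.Set.empty]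
  rw [hinit, heq]
  exact PySem.List.sorted_eq_of_perm_of_pairwise_lt _ _ pvKey
    (emit_perm _ hnd hit) (emit_pairwise _ hnd hit)
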